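-- pv_equiv track=rewrite | github.com/lratusa/wordmaster | scripts/wordlist_generator/generate_cet4.py | normalize_part_of_speech
-- ===== SOURCE A (Python) =====
-- def normalize_part_of_speech(translations: list[dict]) -> str:
--     """
--     Normalize part of speech from translations.
--
--     Args:
--         translations: List of translation dictionaries with 'type' field
--
--     Returns:
--         Normalized part of speech string
--     """
--     pos_map = {
--         'n': 'n.',
--         'v': 'v.',
--         'vt': 'vt.',
--         'vi': 'vi.',
--         'adj': 'adj.',
--         'adv': 'adv.',
--         'prep': 'prep.',
--         'conj': 'conj.',
--         'pron': 'pron.',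
--         'int': 'int.',
--         'art': 'art.',
--         'num': 'num.',
--     }
--
--     types = set()
--     for trans in translations:
--         pos = trans.get('type', '').lower().strip()
--         # Handle compound types like "n & v"
--         for part in pos.replace('&', ' ').split():
--             part = part.strip()
--             if part in pos_map:
--                 types.add(pos_map[part])
--             elif part:
--                 types.add(part + '.' if not part.endswith('.') else part)
--
--     if not types:
--         return ''
--
--     # Sort by common order
--     order = ['n.', 'v.', 'vt.', 'vi.', 'adj.', 'adv.', 'prep.', 'conj.', 'pron.']
--     sorted_types = sorted(types, key=lambda x: order.index(x) if x in order else 100)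
--
--     return '/'.join(sorted_types)
-- ===== SOURCE B (Python) =====
-- def normalize_part_of_speech(translations: list[dict]) -> str:
--     """Same result as A: the pos_map table is redundant (every entry just appends a
--     dot), so normalization collapses to one rule; the key-based sort is replaced by a
--     scan of the fixed priority list plus a leftover pass over the set."""
--     types = set()
--     for trans in translations:
--         pos = trans.get('type', '').lower().strip()
--         for part in pos.replace('&', ' ').split():
--             part = part.strip()
--             if part:
--                 types.add(part if part.endswith('.') else part + '.')
--
--     if not types:
--         return ''
--
--     order = ['n.', 'v.', 'vt.', 'vi.', 'adj.', 'adv.', 'prep.', 'conj.', 'pron.']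
--     result = [t for t in order if t in types] + [t for t in types if t not in order]
--     return '/'.join(result)
-- ===== Notes on version B (the rewrite author's own statement) =====
-- stated objective: simpler
-- what changed: B drops the 12-entry pos_map table (every entry merely appends a dot, so normalization collapses to the single rule 'append a dot unless one is already there') and replaces the key-based sort by a scan of the fixed priority list followed by a leftover pass over the set.
-- outside the precondition, e.g. on normalize_part_of_speech([{'type': 'xx yy'}]): A returns 'xx./yy.', B returns 'xx./yy.'
import Mathlib
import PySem

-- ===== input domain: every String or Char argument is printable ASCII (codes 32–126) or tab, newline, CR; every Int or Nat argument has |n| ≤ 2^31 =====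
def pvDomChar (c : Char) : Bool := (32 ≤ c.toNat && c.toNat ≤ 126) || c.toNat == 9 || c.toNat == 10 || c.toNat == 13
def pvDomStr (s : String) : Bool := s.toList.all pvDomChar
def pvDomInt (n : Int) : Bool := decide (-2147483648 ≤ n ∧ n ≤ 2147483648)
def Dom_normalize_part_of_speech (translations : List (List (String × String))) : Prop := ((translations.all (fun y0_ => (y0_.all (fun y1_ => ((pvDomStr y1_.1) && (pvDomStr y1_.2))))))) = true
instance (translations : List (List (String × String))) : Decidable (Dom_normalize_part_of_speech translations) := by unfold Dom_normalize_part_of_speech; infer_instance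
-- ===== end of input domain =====

-- One honest line: B deletes the redundant pos_map table (each entry only appends a dot) and
-- replaces the key-based sort by a priority-list scan plus a leftover pass; objective: simpler.

-- ===== PORT A =====
def pvPosMap : PySem.Dict String String := PySem.Dict.mk
  [("n", "n."), ("v", "v."), ("vt", "vt."), ("vi", "vi."), ("adj", "adj."),
   ("adv", "adv."), ("prep", "prep."), ("conj", "conj."), ("pron", "pron."),
   ("int", "int."), ("art", "art."), ("num", "num.")]

def pvOrder : List String := ["n.", "v.", "vt.", "vi.", "adj.", "adv.", "prep.", "conj.", "pron."]

-- key=lambda x: order.index(x) if x in order else 100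
def pvKeyA (x : String) : Int :=
  if x ∈ pvOrder then (((PySem.List.index? pvOrder x).getD 0 : Nat) : Int) else 100

-- the loop 'for trans in translations: … types.add(…)' of A
def pvTypesA (translations : List (List (String × String))) : PySem.Set String :=
  translations.foldl (fun types trans =>
    let pos := PySem.Str.strip (PySem.Str.lower (PySem.Dict.getD (PySem.Dict.mk trans) "type" ""))
    (PySem.Str.split₀ (PySem.Str.replace pos "&" " ")).foldl (fun types part =>
      let part := PySem.Str.strip part
      if pvPosMap.contains part then
        PySem.Set.add types (pvPosMap.getD part "")
      else if part ≠ "" then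
        PySem.Set.add types (if ¬ PySem.Str.endswith part "." then part ++ "." else part)
      else types) types) PySem.Set.empty

def normalize_part_of_speech (translations : List (List (String × String))) : String :=
  let types := pvTypesA translations
  if types = [] then ""
  else PySem.Str.join "/" (PySem.List.sorted types pvKeyA false)

-- ===== PORT B =====
-- the same parsing loop, with the single normalization rule instead of the table
def pvTypesB (translations : List (List (String × String))) : PySem.Set String :=
  translations.foldl (fun types trans =>
    let pos := PySem.Str.strip (PySem.Str.lower (PySem.Dict.getD (PySem.Dict.mk trans) "type" ""))
    (PySem.Str.split₀ (PySem.Str.replace pos "&" " ")).foldl (fun types part =>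
      let part := PySem.Str.strip part
      if part ≠ "" then
        PySem.Set.add types (if PySem.Str.endswith part "." then part else part ++ ".")
      else types) types) PySem.Set.empty

def normalize_part_of_speech_alt (translations : List (List (String × String))) : String :=
  let types := pvTypesB translations
  if types = [] then ""
  else PySem.Str.join "/"
    ((pvOrder.filter (fun t => t ∈ types)) ++ (types.filter (fun t => ¬ t ∈ pvOrder)))

-- ===== PRECONDITION & SPEC =====
-- Pre_-side copy of the tag pipeline (independent of the ports)
def pvPreTags (translations : List (List (String × String))) : List String :=
  translations.flatMap (fun trans =>
    (((PySem.Str.split₀ (PySem.Str.replace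
          (PySem.Str.strip (PySem.Str.lower (PySem.Dict.getD (PySem.Dict.mk trans) "type" "")))
          "&" " ")).map PySem.Str.strip).filter (fun p => p ≠ "")).map
      (fun p => if PySem.Str.endswith p "." then p else p ++ "."))

-- Pre_ excludes inputs yielding two or more distinct tags outside the priority list: Python's
-- sort is stable on the set's hash-randomized iteration order there, so the relative order of
-- such tags in A's (and B's) output is not a function of the input and cannot be ported.
def Pre_normalize_part_of_speech (translations : List (List (String × String))) : Prop :=
  ((PySem.Set.ofList (pvPreTags translations)).filter (fun t => ¬ t ∈ pvOrder)).length ≤ 1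

instance (translations : List (List (String × String))) : Decidable (Pre_normalize_part_of_speech translations) := by
  unfold Pre_normalize_part_of_speech; infer_instance

def pvWitness_normalize_part_of_speech : (List (List (String × String))) :=
  [[("type", "N & V")], [("type", "foo adj")]]

def Spec_normalize_part_of_speech (translations : List (List (String × String))) (out : String) : Prop :=
  out = normalize_part_of_speech_alt translations
instance (translations : List (List (String × String))) (out : String) : Decidable (Spec_normalize_part_of_speech translations out) := by
  unfold Spec_normalize_part_of_speech; infer_instance

-- ===== CLAIM (what is proved, stated in full; the proofs are below) =====
def Claim_equal_normalize_part_of_speech : Prop :=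
  ∀ (translations : List (List (String × String))),
    Dom_normalize_part_of_speech translations →
    Pre_normalize_part_of_speech translations →
    Spec_normalize_part_of_speech translations (normalize_part_of_speech translations)

-- ===== LEMMAS AND PROOFS =====


theorem pv_body_eq (types : PySem.Set String) (p : String) :
    (if pvPosMap.contains p then PySem.Set.add types (pvPosMap.getD p "")
     else if p ≠ "" then
       PySem.Set.add types (if ¬ PySem.Str.endswith p "." then p ++ "." else p)
     else types)
    = (if p ≠ "" then
         PySem.Set.add types (if PySem.Str.endswith p "." then p else p ++ ".")
       else types) := by
  by_cases hc : pvPosMap.contains p = true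
  · simp only [pvPosMap, PySem.Dict.contains_mk, List.any_cons, List.any_nil,
      Bool.or_eq_true, beq_iff_eq, Bool.false_eq_true, or_false] at hc
    rcases hc with h|h|h|h|h|h|h|h|h|h|h|h <;> subst h <;>
      rw [if_pos (by decide), if_pos (by decide), if_neg (by decide)] <;>
      exact congrArg _ (by decide)
  · rw [if_neg hc]
    by_cases hp : p ≠ ""
    · rw [if_pos hp, if_pos hp]
      by_cases he : PySem.Str.endswith p "." = true
      · rw [if_neg (not_not_intro he), if_pos he]
      · rw [if_pos he, if_neg he]
    · rw [if_neg hp, if_neg hp]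

theorem pv_types_eq (translations : List (List (String × String))) :
    pvTypesA translations = pvTypesB translations := by
  unfold pvTypesA pvTypesB
  apply PySem.List.foldl_congr_mem
  intro acc trans _
  apply PySem.List.foldl_congr_mem
  intro acc2 part _
  exact pv_body_eq acc2 (PySem.Str.strip part)

-- one translation's inner token loop, as a Set.update
theorem pv_inner_update (toks : List String) (s : PySem.Set String) :
    toks.foldl (fun types part =>
      let part := PySem.Str.strip part
      if part ≠ "" then
        PySem.Set.add types (if PySem.Str.endswith part "." then part else part ++ ".")
      else types) s
    = PySem.Set.update s
        (((toks.map PySem.Str.strip).filter (fun p => p ≠ "")).map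
          (fun p => if PySem.Str.endswith p "." then p else p ++ ".")) := by
  induction toks generalizing s with
  | nil => rfl
  | cons t ts ih =>
    rw [List.foldl_cons, List.map_cons, List.filter_cons]
    dsimp only
    by_cases h : PySem.Str.strip t = ""
    · rw [if_neg (not_not_intro h), if_neg (by simp [h])]
      exact ih s
    · have hd : decide (PySem.Str.strip t ≠ "") = true := by simp [h]
      rw [if_pos h, if_pos hd, List.map_cons, ih]
      rfl

theorem pv_update_append (s : PySem.Set String) (xs ys : List String) :
    PySem.Set.update s (xs ++ ys) = PySem.Set.update (PySem.Set.update s xs) ys := by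
  simp only [PySem.Set.update, List.foldl_append]

theorem pv_typesB_ofList (translations : List (List (String × String))) :
    pvTypesB translations = PySem.Set.ofList (pvPreTags translations) := by
  rw [PySem.Set.ofList_eq_foldl]
  show pvTypesB translations = PySem.Set.update [] (pvPreTags translations)
  unfold pvTypesB pvPreTags
  induction translations using List.reverseRecOn with
  | nil => rfl
  | append_singleton ts tr ih =>
    rw [List.foldl_append, List.foldl_cons, List.foldl_nil,
        List.flatMap_append, pv_update_append, ← ih]
    simp only [List.flatMap_cons, List.flatMap_nil, List.append_nil]
    exact pv_inner_update _ _

theorem pv_sorted_eq (types : PySem.Set String)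
    (hnd : types.Nodup)
    (hle : (types.filter (fun t => ¬ t ∈ pvOrder)).length ≤ 1) :
    PySem.List.sorted types pvKeyA false
      = (pvOrder.filter (fun t => t ∈ types)) ++ (types.filter (fun t => ¬ t ∈ pvOrder)) := by
  apply PySem.List.sorted_eq_of_perm_of_pairwise_lt
  · -- permutation
    have h1 : (pvOrder.filter (fun t => t ∈ types)).Perm (types.filter (fun t => t ∈ pvOrder)) := by
      refine (List.perm_ext_iff_of_nodup ?_ ?_).mpr ?_
      · exact (List.filter_sublist).nodup (by decide)
      · exact (List.filter_sublist).nodup hnd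
      · intro a; simp only [List.mem_filter, decide_eq_true_eq]; tauto
    have h2 := List.filter_append_perm (fun t => decide (t ∈ pvOrder)) types
    have h3 : (types.filter (fun t => ¬ t ∈ pvOrder))
        = types.filter (fun x => !decide (x ∈ pvOrder)) := by
      simp [decide_not]
    refine List.Perm.trans (h1.append_right _) ?_
    rw [h3]; exact h2
  · -- strictly increasing keys
    rw [List.pairwise_append]
    refine ⟨?_, ?_, ?_⟩
    · exact List.Pairwise.sublist (List.filter_sublist)
        (by decide : pvOrder.Pairwise (fun a b => pvKeyA a < pvKeyA b))
    · rcases h : types.filter (fun t => ¬ t ∈ pvOrder) with _ | ⟨a, _ | ⟨b, l⟩⟩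
      · exact List.Pairwise.nil
      · exact List.pairwise_singleton _ _
      · rw [h] at hle; simp at hle
    · intro a ha b hb
      have ha' : a ∈ pvOrder := (List.mem_filter.mp ha).1
      have hb' : ¬ b ∈ pvOrder := by
        have := (List.mem_filter.mp hb).2; simpa using this
      have h100 : pvKeyA b = 100 := by simp [pvKeyA, hb']
      have hlt : ∀ x ∈ pvOrder, pvKeyA x < 100 := by decide
      rw [h100]; exact hlt a ha'

-- ===== VERDICT (by name: the statement is the Claim_ definition above) =====
theorem normalize_part_of_speech_spec : Claim_equal_normalize_part_of_speech := by
  intro translations _ hpre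
  show normalize_part_of_speech translations = normalize_part_of_speech_alt translations
  unfold normalize_part_of_speech normalize_part_of_speech_alt
  rw [pv_types_eq]
  by_cases h : pvTypesB translations = []
  · simp [h]
  · simp only [if_neg h]
    congr 1
    apply pv_sorted_eq
    · rw [pv_typesB_ofList]; exact PySem.Set.nodup_ofList _
    · unfold Pre_normalize_part_of_speech at hpre
      rw [pv_typesB_ofList]
      exact hpre
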